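-- pv_equiv track=rewrite | github.com/Nomoos/StoryGenerator | scripts/scrapers/base_scraper.py | filter_age_appropriate
-- ===== SOURCE A (Python) =====
-- from typing import List, Dict, Optional
--
-- def filter_age_appropriate(
--                           content_items: List[Dict],
--                           age_bucket: str) -> List[Dict]:
--     """Filter content for age-appropriateness.
--
--     Args:
--         content_items: List of content items to filter
--         age_bucket: Target age bucket ('10-13', '14-17', or '18-23')
--
--     Returns:
--         Filtered list of content items
--     """
--     # Simple keyword filtering
--     inappropriate_keywords = {
--         "10-13": ["sex", "drugs", "violence", "nsfw", "explicit", "porn", "adult"],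
--         "14-17": ["explicit", "nsfw", "porn", "adult"],
--         "18-23": []  # No filtering for adults
--     }
--
--     keywords = inappropriate_keywords.get(age_bucket, [])
--     if not keywords:
--         return content_items
--
--     filtered = []
--     for item in content_items:
--         # Check title and text content
--         text_lower = (item.get("title", "") + " " + item.get("text", "")).lower()
--         if not any(kw in text_lower for kw in keywords):
--             filtered.append(item)
--
--     return filtered
-- ===== SOURCE B (Python) =====
-- def filter_age_appropriate(content_items, age_bucket):
--     """Filter content for age-appropriateness (alternative implementation:
--     branch chain + comprehension + a single left-to-right position scan
--     instead of dict lookup + accumulator loop + per-keyword substring scans)."""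
--     if age_bucket == "10-13":
--         keywords = ["sex", "drugs", "violence", "nsfw", "explicit", "porn", "adult"]
--     elif age_bucket == "14-17":
--         keywords = ["explicit", "nsfw", "porn", "adult"]
--     else:
--         return content_items
--     return [item for item in content_items
--             if not _contains_any(
--                 (item.get("title", "") + " " + item.get("text", "")).lower(),
--                 keywords)]
--
--
-- def _contains_any(text, keywords):
--     # naive multi-pattern matcher: one pass over the positions of text,
--     # testing every keyword at each position
--     for i in range(len(text) + 1):
--         for kw in keywords:
--             if text.startswith(kw, i):
--                 return True
--     return False
-- ===== Notes on version B (the rewrite author's own statement) =====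
-- stated objective: alternative
-- what changed: Replaced the dict lookup + accumulator loop + any(kw in text) per-keyword substring scans by an if/elif branch chain, a list comprehension, and a single left-to-right position scan that tests every keyword at each position (naive multi-pattern matcher).
import Mathlib
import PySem

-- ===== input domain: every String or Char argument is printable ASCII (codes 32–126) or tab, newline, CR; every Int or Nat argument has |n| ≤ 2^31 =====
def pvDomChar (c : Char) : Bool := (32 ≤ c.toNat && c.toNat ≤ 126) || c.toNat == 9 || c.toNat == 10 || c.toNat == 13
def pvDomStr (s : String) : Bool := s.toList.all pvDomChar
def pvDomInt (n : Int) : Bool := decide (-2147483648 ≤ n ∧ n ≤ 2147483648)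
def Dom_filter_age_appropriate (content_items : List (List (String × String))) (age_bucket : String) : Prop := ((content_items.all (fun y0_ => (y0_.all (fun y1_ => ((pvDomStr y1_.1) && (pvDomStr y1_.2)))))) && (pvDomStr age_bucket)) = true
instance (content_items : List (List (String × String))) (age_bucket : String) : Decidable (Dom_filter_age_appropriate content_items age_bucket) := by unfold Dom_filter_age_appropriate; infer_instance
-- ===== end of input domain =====

-- ===== PORT A =====
-- B: branch chain + comprehension + single position scan instead of dict lookup + loop + per-keyword scans (alternative, same cost).
def pvItemText (item : List (String × String)) : String :=
  (PySem.Dict.mk item).getD "title" "" ++ " " ++ (PySem.Dict.mk item).getD "text" ""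

def filter_age_appropriate (content_items : List (List (String × String))) (age_bucket : String) : List (List (String × String)) :=
  let inappropriate_keywords : PySem.Dict String (List String) :=
    PySem.Dict.mk
      [("10-13", ["sex", "drugs", "violence", "nsfw", "explicit", "porn", "adult"]),
       ("14-17", ["explicit", "nsfw", "porn", "adult"]),
       ("18-23", [])]
  let keywords := inappropriate_keywords.getD age_bucket []
  if keywords = [] then content_items
  else
    content_items.foldl (fun filtered item =>
      let text_lower := PySem.Str.lower (pvItemText item)
      if !(keywords.any (fun kw => PySem.Str.isIn kw text_lower)) then filtered ++ [item]
      else filtered) []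

-- ===== PORT B =====
-- text.startswith(kw, i): for 0 ≤ i ≤ len(text), Python's start argument slices from i, so
-- this is exactly Chars.startswith on (text.drop i) — exact here since i ranges over 0..len.
def pvContainsAny (text : List Char) (keywords : List String) : Bool :=
  (List.range (text.length + 1)).any (fun i =>
    keywords.any (fun kw => PySem.Chars.startswith (text.drop i) kw.toList))

def pvKeep (keywords : List String) (item : List (String × String)) : Bool :=
  !(pvContainsAny (PySem.Str.lower (pvItemText item)).toList keywords)

def filter_age_appropriate_alt (content_items : List (List (String × String))) (age_bucket : String) : List (List (String × String)) :=
  if age_bucket == "10-13" then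
    content_items.filter (pvKeep ["sex", "drugs", "violence", "nsfw", "explicit", "porn", "adult"])
  else if age_bucket == "14-17" then
    content_items.filter (pvKeep ["explicit", "nsfw", "porn", "adult"])
  else content_items

-- ===== PRECONDITION & SPEC =====
def Spec_filter_age_appropriate (content_items : List (List (String × String))) (age_bucket : String) (out : List (List (String × String))) : Prop := out = filter_age_appropriate_alt content_items age_bucket
instance (content_items : List (List (String × String))) (age_bucket : String) (out : List (List (String × String))) : Decidable (Spec_filter_age_appropriate content_items age_bucket out) := by unfold Spec_filter_age_appropriate; infer_instance

-- ===== CLAIM (what is proved, stated in full; the proofs are below) =====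
def Claim_equal_filter_age_appropriate : Prop := ∀ (content_items : List (List (String × String))) (age_bucket : String), Dom_filter_age_appropriate content_items age_bucket → Spec_filter_age_appropriate content_items age_bucket (filter_age_appropriate content_items age_bucket)

-- ===== LEMMAS AND PROOFS =====
theorem pvAny_isIn_eq_containsAny (kws : List String) (t : String) :
    kws.any (fun kw => PySem.Str.isIn kw t) = pvContainsAny t.toList kws := by
  rw [Bool.eq_iff_iff]
  unfold pvContainsAny
  simp only [List.any_eq_true, List.mem_range]
  constructor
  · rintro ⟨kw, hkw, h⟩
    rw [PySem.Str.isIn_iff_infix] at h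
    obtain ⟨j, hj⟩ := (PySem.Chars.exists_prefix_drop_iff_isIn kw.toList t.toList).mpr
      ((PySem.Chars.isIn_iff_infix _ _).mpr h)
    by_cases hle : j ≤ t.toList.length
    · exact ⟨j, by omega, kw, hkw, (PySem.Chars.startswith_iff _ _).mpr hj⟩
    · refine ⟨t.toList.length, by omega, kw, hkw, ?_⟩
      rw [List.drop_eq_nil_of_le (by omega)] at hj
      rw [List.drop_length]
      exact (PySem.Chars.startswith_iff _ _).mpr hj
  · rintro ⟨i, _, kw, hkw, h⟩
    refine ⟨kw, hkw, ?_⟩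
    rw [PySem.Str.isIn_iff_infix, ← PySem.Chars.isIn_iff_infix,
        ← PySem.Chars.exists_prefix_drop_iff_isIn]
    exact ⟨i, (PySem.Chars.startswith_iff _ _).mp h⟩

theorem pvFold_eq_filter (items : List (List (String × String))) (kws : List String) :
    items.foldl (fun filtered item =>
      if !(kws.any (fun kw => PySem.Str.isIn kw (PySem.Str.lower (pvItemText item)))) then filtered ++ [item]
      else filtered) [] = items.filter (pvKeep kws) := by
  rw [PySem.List.foldl_append_if_eq_filter
        (fun item => !(kws.any (fun kw => PySem.Str.isIn kw (PySem.Str.lower (pvItemText item)))))]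
  simp only [List.nil_append]
  refine List.filter_congr (fun item _ => ?_)
  rw [pvKeep, pvAny_isIn_eq_containsAny]

theorem pvGetD_other (b : String) (h1 : b ≠ "10-13") (h2 : b ≠ "14-17") :
    (PySem.Dict.mk
      [("10-13", ["sex", "drugs", "violence", "nsfw", "explicit", "porn", "adult"]),
       ("14-17", ["explicit", "nsfw", "porn", "adult"]),
       ("18-23", ([] : List String))]).getD b [] = [] := by
  rw [PySem.Dict.getD_eq_get?_getD, PySem.Dict.get?_mk_cons, PySem.Dict.get?_mk_cons,
      PySem.Dict.get?_mk_cons]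
  have e1 : (("10-13" : String) == b) = false := by
    simp only [beq_eq_false_iff_ne, ne_eq]; exact fun h => h1 h.symm
  have e2 : (("14-17" : String) == b) = false := by
    simp only [beq_eq_false_iff_ne, ne_eq]; exact fun h => h2 h.symm
  rw [e1, e2]
  by_cases h3 : ("18-23" : String) == b <;> simp [h3, PySem.Dict.get?]

-- ===== VERDICT (by name: the statement is the Claim_ definition above) =====
theorem filter_age_appropriate_spec : Claim_equal_filter_age_appropriate := by
  intro content_items age_bucket _
  unfold Spec_filter_age_appropriate filter_age_appropriate filter_age_appropriate_alt
  by_cases h1 : age_bucket = "10-13"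
  · subst h1
    simp only [beq_self_eq_true, if_true]
    rw [show (PySem.Dict.mk
      [("10-13", ["sex", "drugs", "violence", "nsfw", "explicit", "porn", "adult"]),
       ("14-17", ["explicit", "nsfw", "porn", "adult"]),
       ("18-23", ([] : List String))]).getD "10-13" []
      = ["sex", "drugs", "violence", "nsfw", "explicit", "porn", "adult"] from by decide]
    simp only [reduceCtorEq, if_false]
    exact pvFold_eq_filter _ _
  · by_cases h2 : age_bucket = "14-17"
    · subst h2
      have : (("14-17" : String) == "10-13") = false := by decide
      simp only [this, Bool.false_eq_true, if_false, beq_self_eq_true, if_true]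
      rw [show (PySem.Dict.mk
        [("10-13", ["sex", "drugs", "violence", "nsfw", "explicit", "porn", "adult"]),
         ("14-17", ["explicit", "nsfw", "porn", "adult"]),
         ("18-23", ([] : List String))]).getD "14-17" []
        = ["explicit", "nsfw", "porn", "adult"] from by decide]
      simp only [reduceCtorEq, if_false]
      exact pvFold_eq_filter _ _
    · have e1 : (age_bucket == "10-13") = false := by simp [h1]
      have e2 : (age_bucket == "14-17") = false := by simp [h2]
      simp only [e1, e2, Bool.false_eq_true, if_false]
      rw [pvGetD_other age_bucket h1 h2]
      simp
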